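-- pv_equiv track=rewrite | github.com/fsuels/dresslikemommy | ops/scripts/validate_import_ready_csv.py | collect_target_handles
-- ===== SOURCE A (Python) =====
-- from typing import Dict, Iterable, List, Sequence, Set, Tuple
--
-- ROW_HANDLE = "Handle"
--
-- ROW_STATUS = "Status"
--
-- ACTIVE_STATUS = "active"
--
-- def clean(value: str) -> str:
--     return (value or "").strip()
--
-- def normalized_key(value: str) -> str:
--     return clean(value).lower()
--
-- def collect_target_handles(rows: Sequence[Dict[str, str]], all_statuses: bool) -> List[str]:
--     statuses_by_handle: Dict[str, str] = {}
--     for row in rows: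
--         handle = clean(row.get(ROW_HANDLE, ""))
--         if not handle:
--             continue
--         incoming = clean(row.get(ROW_STATUS, ""))
--         existing = statuses_by_handle.get(handle, "")
--         if normalized_key(existing) == ACTIVE_STATUS:
--             continue
--         statuses_by_handle[handle] = incoming or existing
--
--     if all_statuses:
--         return sorted(statuses_by_handle.keys())
--
--     return sorted(
--         handle
--         for handle, status in statuses_by_handle.items()
--         if normalized_key(status) == ACTIVE_STATUS
--     )
-- ===== SOURCE B (Python) =====
-- def collect_target_handles(rows, all_statuses):
--     # Staged, stateless pipeline instead of a fold with a mutable dict: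
--     # 1) normalize every row once into (handle, lowered status) pairs,
--     # 2) collect the distinct non-empty handles with a set comprehension,
--     # 3) decide "targeted" per handle by scanning the cleaned pairs with any():
--     #    a handle's final status in A normalizes to "active" iff some row
--     #    gave it a status whose strip().lower() is "active" (first-active
--     #    locking and last-non-empty overwriting both preserve this fact).
--     cleaned = [(row.get("Handle", "").strip(),
--                 row.get("Status", "").strip().lower())
--                for row in rows]
--     handles = {h for h, _ in cleaned if h}
--     if all_statuses:
--         return sorted(handles)
--     return sorted(h for h in handles
--                   if any(s == "active" for h2, s in cleaned if h2 == h))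
-- ===== Notes on version B (the rewrite author's own statement) =====
-- stated objective: alternative
-- what changed: Replaces A's stateful order-dependent dict fold (lock-on-active, overwrite-on-non-empty) with a stateless staged pipeline: normalize all rows once into (handle, lowered status) pairs, take the distinct non-empty handles by set comprehension, and classify each handle by an inner any()-scan over the cleaned pairs, relying on the fact that A's final status normalizes to 'active' iff some row marked the handle active.
import Mathlib
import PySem

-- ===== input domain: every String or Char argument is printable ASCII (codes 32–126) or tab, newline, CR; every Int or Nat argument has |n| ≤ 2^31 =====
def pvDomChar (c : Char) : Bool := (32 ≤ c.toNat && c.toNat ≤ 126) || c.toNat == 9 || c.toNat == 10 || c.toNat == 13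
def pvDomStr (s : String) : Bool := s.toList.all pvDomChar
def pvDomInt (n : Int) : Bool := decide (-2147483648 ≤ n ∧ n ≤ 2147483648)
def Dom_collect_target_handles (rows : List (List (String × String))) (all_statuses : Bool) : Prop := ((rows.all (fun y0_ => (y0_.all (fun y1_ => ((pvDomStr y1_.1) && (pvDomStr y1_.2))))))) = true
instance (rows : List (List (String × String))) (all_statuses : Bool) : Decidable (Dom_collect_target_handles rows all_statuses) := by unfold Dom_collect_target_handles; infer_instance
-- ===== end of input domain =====

-- B replaces A's stateful dict fold by a stateless staged pipeline (normalize once, distinct handles, per-handle any-scan); same return value, stated as equivalence.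


-- ===== PORT A =====
-- clean(value) = (value or "").strip()
def pvClean (value : String) : String := PySem.Str.strip value
-- normalized_key(value) = clean(value).lower()
def pvNormalizedKey (value : String) : String := PySem.Str.lower (pvClean value)

-- the body of A's 'for row in rows' loop
def pvStepA (d : PySem.Dict String String) (row : List (String × String)) : PySem.Dict String String :=
  let handle := pvClean ((PySem.Dict.mk row).getD "Handle" "")
  if handle = "" then d
  else
    let incoming := pvClean ((PySem.Dict.mk row).getD "Status" "")
    let existing := d.getD handle ""
    if pvNormalizedKey existing = "active" then d
    else d.insert handle (if incoming = "" then existing else incoming)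

def collect_target_handles (rows : List (List (String × String))) (all_statuses : Bool) : List String :=
  let statuses_by_handle := rows.foldl pvStepA PySem.Dict.empty
  if all_statuses then
    PySem.List.sorted statuses_by_handle.keys (fun h => h)
  else
    PySem.List.sorted
      ((statuses_by_handle.items.filter (fun p => pvNormalizedKey p.2 == "active")).map (fun p => p.1))
      (fun h => h)

-- ===== PORT B =====
-- one cleaned row: (handle.strip(), status.strip().lower())
def pvCleanRow (row : List (String × String)) : String × String :=
  (PySem.Str.strip ((PySem.Dict.mk row).getD "Handle" ""),
   PySem.Str.lower (PySem.Str.strip ((PySem.Dict.mk row).getD "Status" "")))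

def collect_target_handles_alt (rows : List (List (String × String))) (all_statuses : Bool) : List String :=
  let cleaned := rows.map pvCleanRow
  let handles := PySem.Set.ofList ((cleaned.filter (fun p => p.1 != "")).map Prod.fst)
  if all_statuses then
    PySem.List.sorted handles (fun h => h)
  else
    PySem.List.sorted
      (handles.filter (fun h => cleaned.any (fun q => q.1 == h && q.2 == "active")))
      (fun h => h)

-- ===== PRECONDITION & SPEC =====
def Spec_collect_target_handles (rows : List (List (String × String))) (all_statuses : Bool) (out : List String) : Prop := out = collect_target_handles_alt rows all_statuses
instance (rows : List (List (String × String))) (all_statuses : Bool) (out : List String) : Decidable (Spec_collect_target_handles rows all_statuses out) := by unfold Spec_collect_target_handles; infer_instance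

-- ===== CLAIM (what is proved, stated in full; the proofs are below) =====
def Claim_equal_collect_target_handles : Prop := ∀ (rows : List (List (String × String))) (all_statuses : Bool), Dom_collect_target_handles rows all_statuses → Spec_collect_target_handles rows all_statuses (collect_target_handles rows all_statuses)

-- ===== LEMMAS AND PROOFS =====
set_option maxHeartbeats 1000000

-- dropWhile is idempotent
theorem pv_dropWhile_idem {α : Type} (p : α → Bool) (l : List α) :
    List.dropWhile p (List.dropWhile p l) = List.dropWhile p l := by
  induction l with
  | nil => simp
  | cons x t ih =>
    by_cases h : p x = true
    · simp [List.dropWhile, h, ih]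
    · simp [List.dropWhile, h]

-- a prefix of a dropWhile-fixed list is dropWhile-fixed
theorem pv_dropWhile_prefix {α : Type} (p : α → Bool) {m n : List α}
    (hpre : m <+: n) (hn : List.dropWhile p n = n) : List.dropWhile p m = m := by
  cases m with
  | nil => simp
  | cons x t =>
    obtain ⟨r, hr⟩ := hpre
    subst hr
    rw [List.dropWhile_eq_self_iff] at hn ⊢
    intro _
    exact hn (by simp)

theorem pv_lstrip_rstrip_lstrip (l : List Char) :
    PySem.Chars.lstrip (PySem.Chars.rstrip (PySem.Chars.lstrip l)) = PySem.Chars.rstrip (PySem.Chars.lstrip l) := by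
  have hfix : List.dropWhile PySem.Chars.isspace (PySem.Chars.lstrip l) = PySem.Chars.lstrip l := by
    simpa [PySem.Chars.lstrip] using pv_dropWhile_idem PySem.Chars.isspace l
  have hpre : PySem.Chars.rstrip (PySem.Chars.lstrip l) <+: PySem.Chars.lstrip l := by
    have := List.dropWhile_suffix (l := (PySem.Chars.lstrip l).reverse) PySem.Chars.isspace
    simpa [PySem.Chars.rstrip] using (List.reverse_prefix.mpr this)
  simpa [PySem.Chars.lstrip] using pv_dropWhile_prefix PySem.Chars.isspace hpre hfix

theorem pv_rstrip_idem (m : List Char) : PySem.Chars.rstrip (PySem.Chars.rstrip m) = PySem.Chars.rstrip m := by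
  simp [PySem.Chars.rstrip, pv_dropWhile_idem]

-- Python's str.strip is idempotent
theorem pv_strip_strip (s : String) : PySem.Str.strip (PySem.Str.strip s) = PySem.Str.strip s := by
  rw [← String.toList_inj]
  rw [PySem.Str.toList_strip, PySem.Str.toList_strip]
  show PySem.Chars.strip (PySem.Chars.strip s.toList) = PySem.Chars.strip s.toList
  unfold PySem.Chars.strip
  rw [pv_lstrip_rstrip_lstrip, pv_rstrip_idem]

-- proof-only fold over two sets bridging A's dict to B's declarative pipeline
def pvStepS (st : PySem.Set String × PySem.Set String) (row : List (String × String)) :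
    PySem.Set String × PySem.Set String :=
  if PySem.Str.strip ((PySem.Dict.mk row).getD "Handle" "") = "" then st
  else
    (PySem.Set.add st.1 (PySem.Str.strip ((PySem.Dict.mk row).getD "Handle" "")),
     if PySem.Str.lower (PySem.Str.strip ((PySem.Dict.mk row).getD "Status" "")) = "active"
     then PySem.Set.add st.2 (PySem.Str.strip ((PySem.Dict.mk row).getD "Handle" "")) else st.2)

-- the invariant tying A's dict to the two proof sets
def pvInv (d : PySem.Dict String String) (st : PySem.Set String × PySem.Set String) : Prop :=
  d.keys.Nodup ∧ st.1.Nodup ∧ st.2.Nodup ∧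
  (∀ h, h ∈ d.keys ↔ h ∈ st.1) ∧
  (∀ h, h ∈ st.2 ↔ h ∈ d.keys ∧ pvNormalizedKey (d.getD h "") = "active")

theorem pv_normKey_empty : pvNormalizedKey "" = "" := by decide

theorem pvInv_step (d : PySem.Dict String String) (st : PySem.Set String × PySem.Set String)
    (row : List (String × String)) (hinv : pvInv d st) : pvInv (pvStepA d row) (pvStepS st row) := by
  obtain ⟨hker, hs1, hs2, hseen, hact⟩ := hinv
  unfold pvStepA pvStepS
  simp only [pvClean]
  set handle := PySem.Str.strip ((PySem.Dict.mk row).getD "Handle" "") with hh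
  by_cases h0 : handle = ""
  · rw [if_pos h0, if_pos h0]
    exact ⟨hker, hs1, hs2, hseen, hact⟩
  · rw [if_neg h0, if_neg h0]
    set incoming := PySem.Str.strip ((PySem.Dict.mk row).getD "Status" "") with hi
    set existing := d.getD handle "" with he
    have hBcond : (PySem.Str.lower incoming = "active") ↔ pvNormalizedKey incoming = "active" := by
      have : pvNormalizedKey incoming = PySem.Str.lower incoming := by
        simp only [pvNormalizedKey, pvClean, hi, pv_strip_strip]
      rw [this]
    by_cases hlock : pvNormalizedKey existing = "active"
    · -- A skips; the set adds are no-ops since handle is already present and active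
      have hmemk : handle ∈ d.keys := by
        by_contra hmk
        have hc : d.contains handle = false := by
          cases hcc : d.contains handle
          · rfl
          · exact absurd ((PySem.Dict.contains_iff_mem_keys d handle).mp hcc) hmk
        have hex : existing = "" := PySem.Dict.getD_of_not_contains d "" hc
        rw [hex, pv_normKey_empty] at hlock
        exact absurd hlock (by decide)
      have hmem1 : handle ∈ st.1 := (hseen handle).mp hmemk
      have hmem2 : handle ∈ st.2 := (hact handle).mpr ⟨hmemk, hlock⟩
      rw [if_pos hlock]
      rw [PySem.Set.add_of_mem hmem1]
      split
      · rw [PySem.Set.add_of_mem hmem2]; exact ⟨hker, hs1, hs2, hseen, hact⟩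
      · exact ⟨hker, hs1, hs2, hseen, hact⟩
    · rw [if_neg hlock]
      set v := (if incoming = "" then existing else incoming) with hv
      set a' := (if PySem.Str.lower incoming = "active" then PySem.Set.add st.2 handle else st.2) with ha'
      have hnormv : pvNormalizedKey v = "active" ↔ PySem.Str.lower incoming = "active" := by
        rw [hBcond, hv]
        by_cases hie : incoming = ""
        · rw [if_pos hie]
          constructor
          · intro hx; exact absurd hx hlock
          · intro hx; rw [hie, pv_normKey_empty] at hx; exact absurd hx (by decide)
        · rw [if_neg hie]
      refine ⟨PySem.Dict.nodup_keys_insert d handle v hker,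
              PySem.Set.nodup_add st.1 handle hs1, ?_, ?_, ?_⟩
      · rw [ha']; split
        · exact PySem.Set.nodup_add st.2 handle hs2
        · exact hs2
      · intro h
        rw [PySem.Dict.mem_keys_insert, PySem.Set.mem_add, ← hseen h]
        exact or_comm
      · intro h
        by_cases hhh : h = handle
        · subst hhh
          rw [PySem.Dict.getD_insert]
          rw [if_pos (Eq.refl handle), PySem.Dict.mem_keys_insert]
          constructor
          · intro hmem
            refine ⟨Or.inl rfl, ?_⟩
            rw [hnormv]
            rw [ha'] at hmem
            by_cases hc : PySem.Str.lower incoming = "active"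
            · exact hc
            · rw [if_neg hc] at hmem
              exact absurd ((hact handle).mp hmem).2 hlock
          · rintro ⟨-, hnv⟩
            rw [hnormv] at hnv
            rw [ha', if_pos hnv]
            exact (PySem.Set.mem_add st.2 handle handle).mpr (Or.inr rfl)
        · have hgd : (d.insert handle v).getD h "" = d.getD h "" := by
            rw [PySem.Dict.getD_insert, if_neg hhh]
          rw [hgd, PySem.Dict.mem_keys_insert]
          have hmema : h ∈ a' ↔ h ∈ st.2 := by
            rw [ha']; split
            · rw [PySem.Set.mem_add]
              constructor
              · rintro (hx | hx)
                · exact hx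
                · exact absurd hx hhh
              · exact Or.inl
            · exact Iff.rfl
          rw [hmema, hact h]
          constructor
          · rintro ⟨hk, hn⟩; exact ⟨Or.inr hk, hn⟩
          · rintro ⟨hk | hk, hn⟩
            · exact absurd hk hhh
            · exact ⟨hk, hn⟩

theorem pvInv_foldl (rows : List (List (String × String))) (d : PySem.Dict String String)
    (st : PySem.Set String × PySem.Set String) (hinv : pvInv d st) :
    pvInv (rows.foldl pvStepA d) (rows.foldl pvStepS st) := by
  induction rows generalizing d st with
  | nil => exact hinv
  | cons r t ih => exact ih _ _ (pvInv_step d st r hinv)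

theorem pvInv_init : pvInv PySem.Dict.empty (PySem.Set.empty, PySem.Set.empty) := by
  refine ⟨?_, ?_, ?_, ?_, ?_⟩ <;> simp [PySem.Dict.empty, PySem.Set.empty, PySem.Dict.keys]

-- membership of the proof fold's seen-set = existence of a cleaned row with that non-empty handle
theorem pvFoldS_mem1 (rows : List (List (String × String))) (st : PySem.Set String × PySem.Set String) (h : String) :
    h ∈ (rows.foldl pvStepS st).1 ↔ h ∈ st.1 ∨ ∃ r ∈ rows, (pvCleanRow r).1 = h ∧ h ≠ "" := by
  induction rows generalizing st with
  | nil => simp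
  | cons r t ih =>
    rw [List.foldl_cons, ih]
    unfold pvStepS
    by_cases h0 : PySem.Str.strip ((PySem.Dict.mk r).getD "Handle" "") = ""
    · rw [if_pos h0]
      simp only [List.mem_cons]
      constructor
      · rintro (hx | hx)
        · exact Or.inl hx
        · obtain ⟨r', hr', hh⟩ := hx; exact Or.inr ⟨r', Or.inr hr', hh⟩
      · rintro (hx | ⟨r', hr' | hr', hh⟩)
        · exact Or.inl hx
        · subst hr'
          exact (hh.2 (hh.1.symm.trans (show (pvCleanRow r').1 = "" from h0))).elim
        · exact Or.inr ⟨r', hr', hh⟩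
    · rw [if_neg h0]
      simp only [PySem.Set.mem_add, List.mem_cons]
      constructor
      · rintro ((hx | hx) | hx)
        · exact Or.inl hx
        · exact Or.inr ⟨r, Or.inl rfl, hx.symm ▸ (show (pvCleanRow r).1 = _ from rfl), hx ▸ h0⟩
        · obtain ⟨r', hr', hh⟩ := hx; exact Or.inr ⟨r', Or.inr hr', hh⟩
      · rintro (hx | ⟨r', hr' | hr', hh⟩)
        · exact Or.inl (Or.inl hx)
        · subst hr'
          exact Or.inl (Or.inr hh.1.symm)
        · exact Or.inr ⟨r', hr', hh⟩

-- membership of the proof fold's active-set = existence of a cleaned row marking h active (h non-empty)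
theorem pvFoldS_mem2 (rows : List (List (String × String))) (st : PySem.Set String × PySem.Set String)
    (h : String) (hne : h ≠ "") :
    h ∈ (rows.foldl pvStepS st).2 ↔ h ∈ st.2 ∨ ∃ r ∈ rows, (pvCleanRow r).1 = h ∧ (pvCleanRow r).2 = "active" := by
  induction rows generalizing st with
  | nil => simp
  | cons r t ih =>
    rw [List.foldl_cons, ih]
    unfold pvStepS
    by_cases h0 : PySem.Str.strip ((PySem.Dict.mk r).getD "Handle" "") = ""
    · rw [if_pos h0]
      simp only [List.mem_cons]
      constructor
      · rintro (hx | hx)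
        · exact Or.inl hx
        · obtain ⟨r', hr', hh⟩ := hx; exact Or.inr ⟨r', Or.inr hr', hh⟩
      · rintro (hx | ⟨r', hr' | hr', hh⟩)
        · exact Or.inl hx
        · subst hr'
          exact (hne ((show (pvCleanRow r').1 = "" from h0).symm.trans hh.1).symm).elim
        · exact Or.inr ⟨r', hr', hh⟩
    · rw [if_neg h0]
      by_cases hs : PySem.Str.lower (PySem.Str.strip ((PySem.Dict.mk r).getD "Status" "")) = "active"
      · rw [if_pos hs]
        simp only [PySem.Set.mem_add, List.mem_cons]
        constructor
        · rintro ((hx | hx) | hx)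
          · exact Or.inl hx
          · exact Or.inr ⟨r, Or.inl rfl, hx.symm ▸ rfl, hs⟩
          · obtain ⟨r', hr', hh⟩ := hx; exact Or.inr ⟨r', Or.inr hr', hh⟩
        · rintro (hx | ⟨r', hr' | hr', hh⟩)
          · exact Or.inl (Or.inl hx)
          · subst hr'
            exact Or.inl (Or.inr hh.1.symm)
          · exact Or.inr ⟨r', hr', hh⟩
      · rw [if_neg hs]
        simp only [List.mem_cons]
        constructor
        · rintro (hx | hx)
          · exact Or.inl hx
          · obtain ⟨r', hr', hh⟩ := hx; exact Or.inr ⟨r', Or.inr hr', hh⟩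
        · rintro (hx | ⟨r', hr' | hr', hh⟩)
          · exact Or.inl hx
          · subst hr'
            exact absurd hh.2 hs
          · exact Or.inr ⟨r', hr', hh⟩

-- membership in B's handles list
theorem pv_mem_handlesList (rows : List (List (String × String))) (h : String) :
    h ∈ ((rows.map pvCleanRow).filter (fun p => p.1 != "")).map Prod.fst ↔
    ∃ r ∈ rows, (pvCleanRow r).1 = h ∧ h ≠ "" := by
  simp only [List.mem_map, List.mem_filter, bne_iff_ne, ne_eq]
  constructor
  · rintro ⟨p, ⟨⟨r, hr, hp⟩, hne⟩, hfst⟩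
    exact ⟨r, hr, hp ▸ hfst, hfst ▸ hne⟩
  · rintro ⟨r, hr, hfst, hne⟩
    exact ⟨pvCleanRow r, ⟨⟨r, hr, rfl⟩, hfst ▸ hne⟩, hfst⟩

-- B's any-scan
theorem pv_any_cleaned (rows : List (List (String × String))) (h : String) :
    ((rows.map pvCleanRow).any (fun q => q.1 == h && q.2 == "active")) = true ↔
    ∃ r ∈ rows, (pvCleanRow r).1 = h ∧ (pvCleanRow r).2 = "active" := by
  simp only [List.any_map, List.any_eq_true, Function.comp_def, Bool.and_eq_true, beq_iff_eq]

-- ===== VERDICT (by name: the statement is the Claim_ definition above) =====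
theorem collect_target_handles_spec : Claim_equal_collect_target_handles := by
  intro rows all_statuses _
  unfold Spec_collect_target_handles collect_target_handles collect_target_handles_alt
  have hinv := pvInv_foldl rows PySem.Dict.empty (PySem.Set.empty, PySem.Set.empty) pvInv_init
  set d := rows.foldl pvStepA PySem.Dict.empty with hd
  set st := rows.foldl pvStepS (PySem.Set.empty, PySem.Set.empty) with hst
  obtain ⟨hker, hs1, hs2, hseen, hact⟩ := hinv
  have hempty1 : ∀ x : String, x ∈ (PySem.Set.empty : PySem.Set String) → False := by
    intro x hx; simp [PySem.Set.empty] at hx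
  have hmemL : ∀ h, h ∈ d.keys ↔
      h ∈ ((rows.map pvCleanRow).filter (fun p => p.1 != "")).map Prod.fst := by
    intro h
    rw [hseen h, hst, pvFoldS_mem1, pv_mem_handlesList]
    constructor
    · rintro (hx | hx)
      · exact absurd hx (hempty1 h)
      · exact hx
    · exact Or.inr
  have hLnodup : (PySem.Set.ofList (((rows.map pvCleanRow).filter (fun p => p.1 != "")).map Prod.fst)).Nodup :=
    PySem.Set.nodup_ofList _
  have hmemOf : ∀ h, h ∈ (PySem.Set.ofList (((rows.map pvCleanRow).filter (fun p => p.1 != "")).map Prod.fst) : List String) ↔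
      h ∈ ((rows.map pvCleanRow).filter (fun p => p.1 != "")).map Prod.fst := by
    intro h; exact PySem.Set.mem_ofList _ h
  cases all_statuses with
  | true =>
    rw [if_pos (rfl : (true : Bool) = true), if_pos (rfl : (true : Bool) = true)]
    refine PySem.List.sorted_eq_sorted_of_perm d.keys _ (fun h => h) (fun a b h => h) ?_
    refine (List.perm_ext_iff_of_nodup hker hLnodup).mpr ?_
    intro h; rw [hmemL h, hmemOf h]
  | false =>
    rw [if_neg (by decide : ¬((false : Bool) = true)), if_neg (by decide : ¬((false : Bool) = true))]
    have hitems : d.items = d.keys.map (fun k => (k, d.getD k "")) :=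
      PySem.Dict.items_eq_map_keys d hker ""
    have hAlist : (d.items.filter (fun p => pvNormalizedKey p.2 == "active")).map (fun p => p.1)
        = d.keys.filter (fun k => pvNormalizedKey (d.getD k "") == "active") := by
      rw [hitems, List.filter_map, List.map_map]
      simp only [Function.comp_def]
      simp
    rw [hAlist]
    have hnodupA : (d.keys.filter (fun k => pvNormalizedKey (d.getD k "") == "active")).Nodup :=
      hker.filter _
    refine PySem.List.sorted_eq_sorted_of_perm _ _ (fun h => h) (fun a b h => h) ?_
    refine (List.perm_ext_iff_of_nodup hnodupA (hLnodup.filter _)).mpr ?_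
    intro h
    rw [List.mem_filter, List.mem_filter, hmemOf h]
    simp only [beq_iff_eq]
    constructor
    · rintro ⟨hk, hn⟩
      have hne : h ≠ "" := by
        obtain ⟨r, _, _, hne⟩ := (pv_mem_handlesList rows h).mp ((hmemL h).mp hk)
        exact hne
      have hin2 : h ∈ st.2 := (hact h).mpr ⟨hk, hn⟩
      rw [hst] at hin2
      rcases (pvFoldS_mem2 rows _ h hne).mp hin2 with hx | hx
      · exact absurd hx (hempty1 h)
      · exact ⟨(hmemL h).mpr ((pv_mem_handlesList rows h).mpr
          (by obtain ⟨r, hr, h1, h2⟩ := hx; exact ⟨r, hr, h1, hne⟩)) |> fun hk' =>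
            ((hmemL h).mp hk' |> fun hh => hh), by
          rw [(pv_any_cleaned rows h)]
          exact hx⟩
    · rintro ⟨hL, hany⟩
      have hne : h ≠ "" := by
        obtain ⟨r, _, _, hne⟩ := (pv_mem_handlesList rows h).mp hL
        exact hne
      have hk : h ∈ d.keys := (hmemL h).mpr hL
      have hex := (pv_any_cleaned rows h).mp hany
      have hin2 : h ∈ st.2 := by
        rw [hst]
        exact (pvFoldS_mem2 rows _ h hne).mpr (Or.inr hex)
      exact (hact h).mp hin2
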